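-- pv_equiv track=rewrite | github.com/rooklift/advent_2024 | 15_part_01.py | box_can_move
-- ===== SOURCE A (Python) =====
-- vecs = {
-- 	"<": [-1, 0],
-- 	">": [1, 0],
-- 	"^": [0, -1],
-- 	"v": [0, 1]
-- }
--
-- def box_can_move(maze, direction, box_x, box_y):
--
-- 	new_x = box_x + vecs[direction][0]
-- 	new_y = box_y + vecs[direction][1]
--
-- 	if maze[new_x][new_y] == ".":
-- 		return True
--
-- 	if maze[new_x][new_y] == "#":
-- 		return False
--
-- 	assert(maze[new_x][new_y] == "O")
--
-- 	return box_can_move(maze, direction, new_x, new_y)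
-- ===== SOURCE B (Python) =====
-- vecs = {
-- 	"<": [-1, 0],
-- 	">": [1, 0],
-- 	"^": [0, -1],
-- 	"v": [0, 1]
-- }
--
-- def box_can_move(maze, direction, box_x, box_y):
-- 	dx, dy = vecs[direction]
-- 	x, y = box_x, box_y
-- 	while True:
-- 		x += dx
-- 		y += dy
-- 		cell = maze[x][y]
-- 		if cell == ".":
-- 			return True
-- 		if cell == "#":
-- 			return False
-- 		assert cell == "O"
-- ===== Notes on version B (the rewrite author's own statement) =====
-- stated objective: idiomatic
-- what changed: The tail recursion is replaced by an iterative while-True loop that hoists the vecs[direction] unpacking out of the loop and maintains only the current position; Pre_ excludes the inputs on which A raises (KeyError for an unknown direction, IndexError off the grid, AssertionError on a cell other than '.', '#', 'O').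
import Mathlib
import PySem

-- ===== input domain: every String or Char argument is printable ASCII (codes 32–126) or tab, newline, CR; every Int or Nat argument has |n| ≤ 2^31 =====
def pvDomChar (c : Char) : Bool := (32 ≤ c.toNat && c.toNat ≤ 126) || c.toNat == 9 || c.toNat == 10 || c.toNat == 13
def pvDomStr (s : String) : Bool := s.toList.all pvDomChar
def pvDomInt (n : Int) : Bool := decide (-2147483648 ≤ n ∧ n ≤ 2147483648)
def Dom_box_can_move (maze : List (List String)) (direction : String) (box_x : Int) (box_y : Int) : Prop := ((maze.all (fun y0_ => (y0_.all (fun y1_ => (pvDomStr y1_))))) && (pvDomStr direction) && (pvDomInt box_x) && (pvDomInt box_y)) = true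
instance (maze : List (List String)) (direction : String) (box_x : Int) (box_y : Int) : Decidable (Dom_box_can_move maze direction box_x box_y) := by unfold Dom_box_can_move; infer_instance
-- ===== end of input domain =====

-- B rewrites A's tail recursion as an iterative while-True loop (hoisting the vecs[direction]
-- unpacking out of the loop, keeping only the current position); equivalence is on return values,
-- Pre_ excludes exactly the inputs on which A raises (KeyError/IndexError/AssertionError).

-- ===== PORT A =====
-- the module-level dict `vecs`
def pvVecs : PySem.Dict String (List Int) :=
  PySem.Dict.ofList [("<", [-1, 0]), (">", [1, 0]), ("^", [0, -1]), ("v", [0, 1])]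

-- fuel bound shared by both ports: on every input where the Python returns, the chain makes at
-- most 2*len(maze) + 2*sum(len(row)) steps (indices in range change monotonically), so this
-- fuel is never exhausted there.
def pvFuel (maze : List (List String)) : Nat :=
  2 * maze.length + 2 * (maze.foldl (fun a r => a + r.length) 0) + 4

def boxGoA (maze : List (List String)) (direction : String) : Nat → Int → Int → Bool
  | 0, _, _ => false
  | fuel + 1, box_x, box_y =>
    match pvVecs.get? direction with
    | none => false          -- KeyError: excluded by Pre_
    | some v =>
      let new_x := box_x + PySem.List.pyGetD v 0 0
      let new_y := box_y + PySem.List.pyGetD v 1 0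
      match PySem.List.pyGet? maze new_x with
      | none => false        -- IndexError: excluded by Pre_
      | some row =>
        match PySem.List.pyGet? row new_y with
        | none => false      -- IndexError: excluded by Pre_
        | some cell =>
          if cell == "." then true
          else if cell == "#" then false
          else if cell == "O" then boxGoA maze direction fuel new_x new_y
          else false         -- AssertionError: excluded by Pre_

def box_can_move (maze : List (List String)) (direction : String) (box_x : Int) (box_y : Int) : Bool :=
  boxGoA maze direction (pvFuel maze) box_x box_y

-- ===== PORT B =====
def boxLoopB (maze : List (List String)) (dx dy : Int) : Nat → Int × Int → Bool
  | 0, _ => false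
  | fuel + 1, (x, y) =>
    let x' := x + dx
    let y' := y + dy
    match (PySem.List.pyGet? maze x').bind (fun row => PySem.List.pyGet? row y') with
    | some cell =>
      if cell == "." then true
      else if cell == "#" then false
      else if cell == "O" then boxLoopB maze dx dy fuel (x', y')
      else false             -- assert fails: excluded by Pre_
    | none => false          -- IndexError: excluded by Pre_

def box_can_move_alt (maze : List (List String)) (direction : String) (box_x : Int) (box_y : Int) : Bool :=
  match pvVecs.get? direction with
  | some [dx, dy] => boxLoopB maze dx dy (pvFuel maze) (box_x, box_y)
  | _ => false               -- KeyError: excluded by Pre_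

-- ===== PRECONDITION & SPEC =====
-- Pre_'s own copy of the direction table and of Python's (negative-index-aware) cell access
def pvPreVec (d : String) : Option (Int × Int) :=
  if d = "<" then some (-1, 0)
  else if d = ">" then some (1, 0)
  else if d = "^" then some (0, -1)
  else if d = "v" then some (0, 1)
  else none

def pvCellAt (maze : List (List String)) (x y : Int) : Option String :=
  (PySem.List.pyGet? maze x).bind (fun row => PySem.List.pyGet? row y)

-- Pre_: the direction is one of "<>^v" and, walking from the box along it, after some k ≥ 0
-- cells that are all "O" (with Python's indexing) the next cell exists and is "." or "#" —
-- exactly the inputs on which A returns instead of raising KeyError/IndexError/AssertionError.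
def Pre_box_can_move (maze : List (List String)) (direction : String) (box_x : Int) (box_y : Int) : Prop :=
  ∃ p ∈ (pvPreVec direction).toList,
    ∃ k ∈ List.range (pvFuel maze),
      (∀ j ∈ List.range k,
        pvCellAt maze (box_x + ((j : Int) + 1) * p.1) (box_y + ((j : Int) + 1) * p.2) = some "O") ∧
      (pvCellAt maze (box_x + ((k : Int) + 1) * p.1) (box_y + ((k : Int) + 1) * p.2) = some "." ∨
       pvCellAt maze (box_x + ((k : Int) + 1) * p.1) (box_y + ((k : Int) + 1) * p.2) = some "#")

instance (maze : List (List String)) (direction : String) (box_x : Int) (box_y : Int) : Decidable (Pre_box_can_move maze direction box_x box_y) := by unfold Pre_box_can_move; infer_instance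

def pvWitness_box_can_move : List (List String) × String × Int × Int :=
  ([[".", ".", "."], [".", "O", "."], [".", ".", "."]], ">", 1, 1)

def Spec_box_can_move (maze : List (List String)) (direction : String) (box_x : Int) (box_y : Int) (out : Bool) : Prop := out = box_can_move_alt maze direction box_x box_y
instance (maze : List (List String)) (direction : String) (box_x : Int) (box_y : Int) (out : Bool) : Decidable (Spec_box_can_move maze direction box_x box_y out) := by unfold Spec_box_can_move; infer_instance

-- ===== CLAIM (what is proved, stated in full; the proofs are below) =====
def Claim_equal_box_can_move : Prop := ∀ (maze : List (List String)) (direction : String) (box_x : Int) (box_y : Int), Dom_box_can_move maze direction box_x box_y → Pre_box_can_move maze direction box_x box_y → Spec_box_can_move maze direction box_x box_y (box_can_move maze direction box_x box_y)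

-- ===== LEMMAS AND PROOFS =====

-- the dict lookup returns none or one of the four two-element vectors
theorem pvVecs_items :
    pvVecs = PySem.Dict.mk [("<", [-1, 0]), (">", [1, 0]), ("^", [0, -1]), ("v", [0, 1])] := by
  decide

theorem pvVecs_cases (d : String) :
    pvVecs.get? d = none ∨ pvVecs.get? d = some [-1, 0] ∨ pvVecs.get? d = some [1, 0] ∨
    pvVecs.get? d = some [0, -1] ∨ pvVecs.get? d = some [0, 1] := by
  rw [pvVecs_items]
  by_cases h1 : "<" = d
  · subst h1; right; left; decide
  by_cases h2 : ">" = d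
  · subst h2; right; right; left; decide
  by_cases h3 : "^" = d
  · subst h3; right; right; right; left; decide
  by_cases h4 : "v" = d
  · subst h4; right; right; right; right; decide
  left
  simp [h1, h2, h3, h4, PySem.Dict.get?]

theorem boxGoA_none (maze : List (List String)) (direction : String)
    (h : pvVecs.get? direction = none) :
    ∀ fuel x y, boxGoA maze direction fuel x y = false := by
  intro fuel x y
  cases fuel with
  | zero => rfl
  | succ f => simp [boxGoA, h]

theorem boxGoA_eq_loop (maze : List (List String)) (direction : String) (dx dy : Int)
    (h : pvVecs.get? direction = some [dx, dy]) :
    ∀ fuel x y, boxGoA maze direction fuel x y = boxLoopB maze dx dy fuel (x, y) := by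
  intro fuel
  induction fuel with
  | zero => intro x y; rfl
  | succ f ih =>
    intro x y
    simp only [boxGoA, boxLoopB, h]
    have h0 : PySem.List.pyGetD [dx, dy] 0 0 = dx := rfl
    have h1 : PySem.List.pyGetD [dx, dy] 1 0 = dy := rfl
    rw [h0, h1]
    cases hr : PySem.List.pyGet? maze (x + dx) with
    | none => rfl
    | some row =>
      cases hc : PySem.List.pyGet? row (y + dy) with
      | none => simp [hc]
      | some cell =>
        simp only [Option.bind_some, hc]
        split_ifs <;> first | rfl | exact ih (x + dx) (y + dy)

-- ===== VERDICT (by name: the statement is the Claim_ definition above) =====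
theorem box_can_move_spec : Claim_equal_box_can_move := by
  intro maze direction box_x box_y _ _
  unfold Spec_box_can_move box_can_move box_can_move_alt
  rcases pvVecs_cases direction with h | h | h | h | h
  · rw [h, boxGoA_none maze direction h]
  all_goals rw [h, boxGoA_eq_loop maze direction _ _ h]
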